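-- pv_equiv track=rewrite | github.com/Neo-Dumas/Neo-DumasTrans | core/json_translator.py | _group_texts_by_char_limit
-- ===== SOURCE A (Python) =====
-- from typing import Dict, Any, List
--
-- def _group_texts_by_char_limit(items: List[Dict], char_limit: int = 500) -> List[List[Dict]]:
--     """
--     将 items 按 content 字数动态分组，每组总字数 ≤ char_limit。
--     注意：只统计 type == 'text' 且非空的文本字数。
--     非文本或空文本单独成组，避免干扰计数。
--     """
--     groups = []
--     current_group = []
--     current_chars = 0
--
--     for item in items:
--         if item.get("type") != "text" or not item["text"].strip():
--             # 非文本或空文本：立即提交当前组（如有），然后单独成组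
--             if current_group:
--                 groups.append(current_group)
--                 current_group = []
--                 current_chars = 0
--             groups.append([item])
--             continue
--
--         text_len = len(item["text"])
--         if current_group and current_chars + text_len > char_limit:
--             groups.append(current_group)
--             current_group = [item]
--             current_chars = text_len
--         else:
--             current_group.append(item)
--             current_chars += text_len
--
--     if current_group:
--         groups.append(current_group)
--
--     return groups
-- ===== SOURCE B (Python) =====
-- from typing import Dict, Any, List
--
-- def _group_texts_by_char_limit(items: List[Dict], char_limit: int = 500) -> List[List[Dict]]:
--     # Two-pass: split items into segments (separator item | run of real text items),
--     # then batch each text run greedily under the char limit.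
--     segments = []  # each: ("sep", item) or ("run", [items...])
--     for item in items:
--         if item.get("type") != "text" or not item["text"].strip():
--             segments.append(("sep", item))
--         elif segments and segments[-1][0] == "run":
--             segments[-1][1].append(item)
--         else:
--             segments.append(("run", [item]))
--
--     groups = []
--     for kind, payload in segments:
--         if kind == "sep":
--             groups.append([payload])
--         else:
--             batch, chars = [], 0
--             for it in payload:
--                 n = len(it["text"])
--                 if batch and chars + n > char_limit:
--                     groups.append(batch)
--                     batch, chars = [it], n
--                 else:
--                     batch.append(it)
--                     chars += n
--             groups.append(batch)
--     return groups
-- ===== Notes on version B (the rewrite author's own statement) =====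
-- stated objective: alternative
-- what changed: A's single loop carrying (groups, current_group, current_chars) is replaced by two passes: first materialize a segment list (separator items vs runs of consecutive real-text items), then emit a singleton group per separator and greedily batch each text run under the char limit.
import Mathlib
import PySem

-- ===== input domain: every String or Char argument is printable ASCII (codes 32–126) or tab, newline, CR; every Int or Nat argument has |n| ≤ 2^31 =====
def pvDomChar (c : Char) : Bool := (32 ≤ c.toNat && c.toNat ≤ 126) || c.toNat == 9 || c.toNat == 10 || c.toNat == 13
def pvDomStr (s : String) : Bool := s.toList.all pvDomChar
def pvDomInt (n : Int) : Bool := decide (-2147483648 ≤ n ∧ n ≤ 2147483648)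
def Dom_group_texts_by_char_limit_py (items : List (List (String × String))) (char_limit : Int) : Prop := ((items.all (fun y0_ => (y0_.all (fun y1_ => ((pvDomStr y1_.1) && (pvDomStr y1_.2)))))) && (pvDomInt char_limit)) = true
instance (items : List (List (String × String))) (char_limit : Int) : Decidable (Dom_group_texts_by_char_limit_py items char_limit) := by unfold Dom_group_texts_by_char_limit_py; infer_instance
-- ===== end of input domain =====

-- B re-decomposes A's single stateful loop into two passes (segment list, then per-run greedy batching); objective: alternative decomposition, same cost.

-- shared trivial helpers (identical subexpressions in both Pythons)
-- item["text"] via getD: exact under Pre_ (the key exists whenever it is accessed)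
def pvTextOf (item : List (String × String)) : String :=
  ((PySem.Dict.mk item).get? "text").getD ""

-- item.get("type") != "text" or not item["text"].strip()
def pvIsSep (item : List (String × String)) : Bool :=
  ((PySem.Dict.mk item).get? "type" != some "text") || (PySem.Str.strip (pvTextOf item) == "")

-- ===== PORT A =====
def pvStepA (char_limit : Int)
    (st : List (List (List (String × String))) × List (List (String × String)) × Int)
    (item : List (String × String)) :
    List (List (List (String × String))) × List (List (String × String)) × Int :=
  if pvIsSep item then
    ((if st.2.1 = [] then st.1 else st.1 ++ [st.2.1]) ++ [[item]], [], 0)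
  else
    let tlen : Int := (PySem.Str.len (pvTextOf item) : Int)
    if st.2.1 ≠ [] ∧ st.2.2 + tlen > char_limit then
      (st.1 ++ [st.2.1], [item], tlen)
    else
      (st.1, st.2.1 ++ [item], st.2.2 + tlen)

def group_texts_by_char_limit_py (items : List (List (String × String))) (char_limit : Int) : List (List (List (String × String))) :=
  let fin := items.foldl (pvStepA char_limit) ([], [], 0)
  if fin.2.1 = [] then fin.1 else fin.1 ++ [fin.2.1]

-- ===== PORT B =====
-- a segment is either a separator item (inl) or a run of consecutive real-text items (inr)
def pvSegStep (segs : List ((List (String × String)) ⊕ (List (List (String × String)))))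
    (item : List (String × String)) :
    List ((List (String × String)) ⊕ (List (List (String × String)))) :=
  if pvIsSep item then segs ++ [Sum.inl item]
  else
    match segs.getLast? with
    | some (Sum.inr run) => segs.dropLast ++ [Sum.inr (run ++ [item])]
    | _ => segs ++ [Sum.inr [item]]

def pvBatchStep (char_limit : Int)
    (st : List (List (List (String × String))) × List (List (String × String)) × Int)
    (it : List (String × String)) :
    List (List (List (String × String))) × List (List (String × String)) × Int :=
  let n : Int := (PySem.Str.len (pvTextOf it) : Int)
  if st.2.1 ≠ [] ∧ st.2.2 + n > char_limit then
    (st.1 ++ [st.2.1], [it], n)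
  else
    (st.1, st.2.1 ++ [it], st.2.2 + n)

def pvBatch (char_limit : Int) (run : List (List (String × String))) : List (List (List (String × String))) :=
  let fin := run.foldl (pvBatchStep char_limit) ([], [], 0)
  fin.1 ++ [fin.2.1]

def pvEmitOne (char_limit : Int)
    (seg : (List (String × String)) ⊕ (List (List (String × String)))) :
    List (List (List (String × String))) :=
  match seg with
  | Sum.inl it => [[it]]
  | Sum.inr run => pvBatch char_limit run

def group_texts_by_char_limit_py_alt (items : List (List (String × String))) (char_limit : Int) : List (List (List (String × String))) :=
  (items.foldl pvSegStep []).foldl (fun groups seg => groups ++ pvEmitOne char_limit seg) []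

-- ===== PRECONDITION & SPEC =====
-- Pre_ excludes exactly the inputs where Python A raises KeyError: an item whose
-- "type" is "text" but which has no "text" key.
def Pre_group_texts_by_char_limit_py (items : List (List (String × String))) (char_limit : Int) : Prop :=
  ∀ item ∈ items, (PySem.Dict.mk item).get? "type" = some "text" →
    ((PySem.Dict.mk item).get? "text").isSome = true
instance (items : List (List (String × String))) (_char_limit : Int) : Decidable (Pre_group_texts_by_char_limit_py items _char_limit) := by unfold Pre_group_texts_by_char_limit_py; infer_instance

def pvWitness_group_texts_by_char_limit_py : (List (List (String × String))) × Int :=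
  ([[("type", "text"), ("text", "hi")], [("type", "image")], [("type", "text"), ("text", "hello")]], 5)

def Spec_group_texts_by_char_limit_py (items : List (List (String × String))) (char_limit : Int) (out : List (List (List (String × String)))) : Prop := out = group_texts_by_char_limit_py_alt items char_limit
instance (items : List (List (String × String))) (char_limit : Int) (out : List (List (List (String × String)))) : Decidable (Spec_group_texts_by_char_limit_py items char_limit out) := by unfold Spec_group_texts_by_char_limit_py; infer_instance

-- ===== CLAIM (what is proved, stated in full; the proofs are below) =====
def Claim_equal_group_texts_by_char_limit_py : Prop := ∀ (items : List (List (String × String))) (char_limit : Int), Dom_group_texts_by_char_limit_py items char_limit → Pre_group_texts_by_char_limit_py items char_limit → Spec_group_texts_by_char_limit_py items char_limit (group_texts_by_char_limit_py items char_limit)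

-- ===== LEMMAS AND PROOFS =====

-- the list of groups a B segment list denotes
def pvEmit (char_limit : Int)
    (segs : List ((List (String × String)) ⊕ (List (List (String × String))))) :
    List (List (List (String × String))) :=
  segs.flatMap (pvEmitOne char_limit)

-- invariant linking A's running state with B's segment list
def pvInv (char_limit : Int)
    (st : List (List (List (String × String))) × List (List (String × String)) × Int)
    (segs : List ((List (String × String)) ⊕ (List (List (String × String))))) : Prop :=
  (st.2.1 = [] ∧ st.2.2 = 0 ∧ st.1 = pvEmit char_limit segs ∧
    ∀ r, segs.getLast? ≠ some (Sum.inr r))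
  ∨ (∃ s' run g, segs = s' ++ [Sum.inr run] ∧
      run.foldl (pvBatchStep char_limit) ([], [], 0) = (g, st.2.1, st.2.2) ∧
      st.2.1 ≠ [] ∧ st.1 = pvEmit char_limit s' ++ g)

theorem pvInv_step (char_limit : Int) (st : List (List (List (String × String))) × List (List (String × String)) × Int) (segs : List ((List (String × String)) ⊕ (List (List (String × String))))) (item : List (String × String)) (h : pvInv char_limit st segs) :
    pvInv char_limit (pvStepA char_limit st item) (pvSegStep segs item) := by
  by_cases hsep : pvIsSep item = true
  · -- separator: both emit cur (if any) then a singleton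
    rcases h with ⟨hc, hch, hg, hlast⟩ | ⟨s', run, g, hs, hb, hcne, hg⟩
    · left
      simp [pvStepA, pvSegStep, hsep, hc, hg, pvEmit, pvEmitOne]
    · left
      refine ⟨by simp [pvStepA, hsep], by simp [pvStepA, hsep], ?_, by simp [pvSegStep, hsep]⟩
      simp only [pvStepA, hsep, if_pos, hcne, pvSegStep]
      simp [hg, hs, pvEmit, pvEmitOne, pvBatch, hb]
  · -- text item
    rcases h with ⟨hc, hch, hg, hlast⟩ | ⟨s', run, g, hs, hb, hcne, hg⟩
    · -- start a new run
      right
      have hlast' : segs.getLast? = none ∨ ∃ it, segs.getLast? = some (Sum.inl it) := by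
        cases hl : segs.getLast? with
        | none => exact Or.inl rfl
        | some s =>
          cases s with
          | inl it => exact Or.inr ⟨it, rfl⟩
          | inr r => exact absurd hl (hlast r)
      refine ⟨segs, [item], [], ?_, ?_, ?_, ?_⟩
      · rcases hlast' with hl | ⟨it, hl⟩ <;> simp [pvSegStep, hsep, hl]
      · simp [pvBatchStep, pvStepA, hsep, hc, hch]
      · simp [pvStepA, hsep, hc]
      · simp [pvStepA, hsep, hc, hg]
    · -- extend the last run
      right
      have hl : segs.getLast? = some (Sum.inr run) := by simp [hs]
      have hd : segs.dropLast = s' := by simp [hs]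
      by_cases hover : char_limit < st.2.2 + ((pvTextOf item).length : Int)
      · refine ⟨s', run ++ [item], g ++ [st.2.1], by simp [pvSegStep, hsep, hl, hd], ?_, ?_, ?_⟩
        · simp [List.foldl_append, hb, pvBatchStep, pvStepA, hsep, hcne, hover, PySem.Str.len]
        · simp [pvStepA, hsep, hcne, hover, PySem.Str.len]
        · simp [pvStepA, hsep, hcne, hover, hg, PySem.Str.len]
      · refine ⟨s', run ++ [item], g, by simp [pvSegStep, hsep, hl, hd], ?_, ?_, ?_⟩
        · simp [List.foldl_append, hb, pvBatchStep, pvStepA, hsep, hcne, hover, PySem.Str.len]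
        · simp [pvStepA, hsep, hcne, hover, PySem.Str.len]
        · simp [pvStepA, hsep, hcne, hover, hg, PySem.Str.len]

theorem pvInv_foldl (char_limit : Int) (items : List (List (String × String))) :
    ∀ st segs, pvInv char_limit st segs →
      pvInv char_limit (items.foldl (pvStepA char_limit) st) (items.foldl pvSegStep segs) := by
  induction items with
  | nil => intro st segs h; exact h
  | cons item rest ih =>
    intro st segs h
    exact ih _ _ (pvInv_step char_limit st segs item h)

theorem pvEmit_eq_foldl (char_limit : Int) segs :
    segs.foldl (fun groups seg => groups ++ pvEmitOne char_limit seg) [] = pvEmit char_limit segs := by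
  rw [PySem.List.foldl_append_eq_flatMap]; simp [pvEmit]

-- ===== VERDICT (by name: the statement is the Claim_ definition above) =====
theorem group_texts_by_char_limit_py_spec : Claim_equal_group_texts_by_char_limit_py := by
  intro items char_limit _ _
  unfold Spec_group_texts_by_char_limit_py group_texts_by_char_limit_py group_texts_by_char_limit_py_alt
  rw [pvEmit_eq_foldl]
  have h0 : pvInv char_limit ([], [], 0) [] := Or.inl ⟨rfl, rfl, rfl, by simp⟩
  have h := pvInv_foldl char_limit items ([], [], 0) [] h0
  rcases h with ⟨hc, _, hg, _⟩ | ⟨s', run, g, hs, hb, hcne, hg⟩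
  · simp [hc, hg]
  · simp only [hcne, if_neg]
    simp [hg, hs, pvEmit, pvEmitOne, pvBatch, hb]
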